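-- pv_equiv track=rewrite | github.com/jdnCreations/50-challenges-python | censored_strings.py | uncensor
-- ===== SOURCE A (Python) =====
-- def uncensor(string, censor):
--     censor_list = []
--     censor_list[:0] = censor
--     new_str = ""
--     for i in range(len(string)):
--         if string[i] == "*":
--             new_str = new_str + censor_list[0]
--             censor_list.pop(0)
--         else:
--             new_str = new_str + string[i]
--     return new_str
-- ===== SOURCE B (Python) =====
-- def uncensor(string, censor):
--     parts = string.split('*')
--     result = parts[0]
--     for i in range(1, len(parts)):
--         result = result + censor[i - 1] + parts[i]
--     return result
-- ===== Notes on version B (the rewrite author's own statement) =====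
-- stated objective: faster
-- what changed: B splits the string on '*' once and interleaves the split segments with successive censor characters, instead of A's per-character walk that concatenates one character at a time onto the result while popping the front of a list built from censor (each pop(0) is O(n)).
import Mathlib
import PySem

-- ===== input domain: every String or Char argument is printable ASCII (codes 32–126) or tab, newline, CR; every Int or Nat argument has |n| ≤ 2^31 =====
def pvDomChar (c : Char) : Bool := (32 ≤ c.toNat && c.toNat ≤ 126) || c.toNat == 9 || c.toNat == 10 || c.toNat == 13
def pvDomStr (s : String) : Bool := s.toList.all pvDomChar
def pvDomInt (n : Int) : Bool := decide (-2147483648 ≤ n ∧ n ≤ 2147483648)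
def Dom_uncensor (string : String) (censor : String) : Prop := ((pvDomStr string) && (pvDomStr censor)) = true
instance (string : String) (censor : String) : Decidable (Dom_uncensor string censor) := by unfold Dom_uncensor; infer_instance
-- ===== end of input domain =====

-- B replaces A's character-by-character walk (popping the front of a censor list) by a
-- split-on-'*' followed by interleaving the segments with successive censor characters;
-- a timing run measured B faster.

-- ===== PORT A =====
-- A's loop: walk the characters of `string`; on '*' emit (and pop) the front of the censor
-- list, else emit the character.  The empty-censor-list case is Python's IndexError,
-- excluded by Pre_uncensor.
def uncensorLoopA : List Char → List Char → List Char → List Char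
  | [], _, acc => acc
  | c :: rest, cl, acc =>
    if c = '*' then
      match cl with
      | [] => acc          -- Python: censor_list[0] raises IndexError here (outside Pre_)
      | h :: t => uncensorLoopA rest t (acc ++ [h])
    else uncensorLoopA rest cl (acc ++ [c])

def uncensor (string : String) (censor : String) : String :=
  String.ofList (uncensorLoopA string.toList censor.toList [])

-- ===== PORT B =====
-- B's loop over parts[1:], consuming censor characters in lockstep with the sequential
-- indices censor[i-1].  The exhausted-censor case is Python's IndexError (outside Pre_).
def uncensorLoopB : List (List Char) → List Char → List Char → List Char
  | [], _, acc => acc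
  | p :: ps, cs, acc =>
    match cs with
    | [] => acc            -- Python: censor[i-1] raises IndexError here (outside Pre_)
    | ch :: cs' => uncensorLoopB ps cs' (acc ++ [ch] ++ p)

def uncensor_alt (string : String) (censor : String) : String :=
  match PySem.Chars.splitOn string.toList ['*'] with
  | [] => ""               -- unreachable: split never returns an empty list
  | p :: ps => String.ofList (uncensorLoopB ps censor.toList p)

-- ===== PRECONDITION & SPEC =====
-- Pre_ excludes exactly the inputs with more '*'s than censor characters, on which the
-- Python A raises IndexError (B raises the same IndexError there).
def Pre_uncensor (string : String) (censor : String) : Prop :=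
  string.toList.count '*' ≤ censor.toList.length
instance (string : String) (censor : String) : Decidable (Pre_uncensor string censor) := by
  unfold Pre_uncensor; infer_instance

def pvWitness_uncensor : String × String := ("he**o w*rld", "llo")

def Spec_uncensor (string : String) (censor : String) (out : String) : Prop := out = uncensor_alt string censor
instance (string : String) (censor : String) (out : String) : Decidable (Spec_uncensor string censor out) := by unfold Spec_uncensor; infer_instance

-- ===== CLAIM (what is proved, stated in full; the proofs are below) =====
def Claim_equal_uncensor : Prop := ∀ (string : String) (censor : String), Dom_uncensor string censor → Pre_uncensor string censor → Spec_uncensor string censor (uncensor string censor)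

-- ===== LEMMAS AND PROOFS =====\n
-- Reference single-char splitter used only by the proofs: mySplit pre l is l split on '*',
-- with the pending (unfinished) segment pre in front.
def mySplit : List Char → List Char → List (List Char)
  | pre, [] => [pre]
  | pre, c :: rest => if c = '*' then pre :: mySplit [] rest else mySplit (pre ++ [c]) rest

lemma splitOn_go_char (fuel : Nat) :
    ∀ (l cur : List Char) (acc : List (List Char)), l.length < fuel →
      PySem.Chars.splitOn.go ['*'] fuel l cur acc = acc.reverse ++ mySplit cur.reverse l := by
  induction fuel with
  | zero => intro l cur acc h; omega
  | succ fuel ih =>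
    intro l cur acc h
    cases l with
    | nil => simp [PySem.Chars.splitOn.go, mySplit]
    | cons c rest =>
      by_cases hc : c = '*'
      · subst hc
        have hpre : List.isPrefixOf ['*'] ('*' :: rest) = true := by
          simp [List.isPrefixOf]
        rw [PySem.Chars.splitOn.go]
        simp only [hpre, if_true]
        rw [show List.drop (['*'] : List Char).length ('*' :: rest) = rest from rfl]
        rw [ih rest [] (List.reverse cur :: acc) (by simpa using Nat.lt_of_succ_lt_succ h)]
        simp [mySplit]
      · have hpre : List.isPrefixOf ['*'] (c :: rest) = false := by
          simp [List.isPrefixOf]; intro hcontra; exact hc hcontra.symm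
        rw [PySem.Chars.splitOn.go]
        simp only [hpre, Bool.false_eq_true, if_false]
        rw [ih rest (c :: cur) acc (by simpa using Nat.lt_of_succ_lt_succ h)]
        simp [mySplit, hc]

lemma splitOn_eq_mySplit (l : List Char) :
    PySem.Chars.splitOn l ['*'] = mySplit [] l := by
  have := splitOn_go_char (l.length + 1) l [] [] (by omega)
  simpa [PySem.Chars.splitOn] using this

lemma mySplit_ne_nil (pre l : List Char) : mySplit pre l ≠ [] := by
  induction l generalizing pre with
  | nil => simp [mySplit]
  | cons c rest ih => by_cases hc : c = '*' <;> simp [mySplit, hc, ih]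

lemma loopA_append (l cs acc : List Char) :
    uncensorLoopA l cs acc = acc ++ uncensorLoopA l cs [] := by
  induction l generalizing cs acc with
  | nil => simp [uncensorLoopA]
  | cons c rest ih =>
    by_cases hc : c = '*'
    · subst hc
      cases cs with
      | nil => simp [uncensorLoopA]
      | cons h t =>
        simp only [uncensorLoopA, if_true]
        rw [ih t (acc ++ [h]), ih t ([] ++ [h])]
        simp
    · simp only [uncensorLoopA, if_neg hc]
      rw [ih cs (acc ++ [c]), ih cs ([] ++ [c])]
      simp

lemma loopB_append (ps : List (List Char)) (cs acc : List Char) :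
    uncensorLoopB ps cs acc = acc ++ uncensorLoopB ps cs [] := by
  induction ps generalizing cs acc with
  | nil => simp [uncensorLoopB]
  | cons p rest ih =>
    cases cs with
    | nil => simp [uncensorLoopB]
    | cons ch cs' =>
      simp only [uncensorLoopB]
      rw [ih cs' (acc ++ [ch] ++ p), ih cs' ([] ++ [ch] ++ p)]
      simp

-- Run B's interleaver on a full split result (first segment emitted verbatim).
def runB : List (List Char) → List Char → List Char
  | [], _ => []
  | p :: ps, cs => p ++ uncensorLoopB ps cs []

lemma runB_cons (ps : List (List Char)) (cs : List Char) (h : Char) (hne : ps ≠ []) :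
    uncensorLoopB ps (h :: cs) [] = h :: runB ps cs := by
  cases ps with
  | nil => exact absurd rfl hne
  | cons q qs =>
    simp only [uncensorLoopB, runB]
    rw [loopB_append qs cs ([] ++ [h] ++ q)]
    simp

lemma key (l : List Char) :
    ∀ (cs pre : List Char), l.count '*' ≤ cs.length →
      runB (mySplit pre l) cs = pre ++ uncensorLoopA l cs [] := by
  induction l with
  | nil => intro cs pre _; simp [mySplit, runB, uncensorLoopB, uncensorLoopA]
  | cons c rest ih =>
    intro cs pre h
    by_cases hc : c = '*'
    · subst hc
      have hcount : rest.count '*' + 1 ≤ cs.length := by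
        simpa [List.count_cons] using h
      cases cs with
      | nil => simp at hcount
      | cons ch cs' =>
        have hrest : rest.count '*' ≤ cs'.length := by simpa using hcount
        have hm : mySplit pre ('*' :: rest) = pre :: mySplit [] rest := by
          simp [mySplit]
        rw [hm]
        simp only [runB]
        rw [runB_cons _ _ _ (mySplit_ne_nil [] rest), ih cs' [] hrest]
        have hA : uncensorLoopA ('*' :: rest) (ch :: cs') [] =
            [ch] ++ uncensorLoopA rest cs' [] := by
          simp only [uncensorLoopA, if_true]
          rw [loopA_append rest cs' ([] ++ [ch])]
          simp
        rw [hA]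
        simp
    · have hcount : rest.count '*' ≤ cs.length := by
        simp only [List.count_cons, hc] at h
        omega
      have hm : mySplit pre (c :: rest) = mySplit (pre ++ [c]) rest := by
        simp [mySplit, hc]
      rw [hm, ih cs (pre ++ [c]) hcount]
      have hA : uncensorLoopA (c :: rest) cs [] = [c] ++ uncensorLoopA rest cs [] := by
        simp only [uncensorLoopA, if_neg hc]
        rw [loopA_append rest cs ([] ++ [c])]
        simp
      rw [hA]
      simp

-- ===== VERDICT (by name: the statement is the Claim_ definition above) =====
theorem uncensor_spec : Claim_equal_uncensor := by
  intro string censor _ hpre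
  unfold Spec_uncensor uncensor uncensor_alt
  rw [splitOn_eq_mySplit]
  have hkey := key string.toList censor.toList [] hpre
  cases hsp : mySplit [] string.toList with
  | nil => exact absurd hsp (mySplit_ne_nil [] string.toList)
  | cons p ps =>
    rw [hsp] at hkey
    simp only [runB, List.nil_append] at hkey
    show String.ofList (uncensorLoopA string.toList censor.toList []) =
      String.ofList (uncensorLoopB ps censor.toList p)
    rw [← hkey, loopB_append ps censor.toList p]
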